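-- pv_equiv track=rewrite | github.com/shru2813/sell_and_buy_stocks | anti_diagonal.py | anti_Diagonal
-- ===== SOURCE A (Python) =====
-- def anti_Diagonal(lst):
--     N = len(lst)
--     result = []
--     for c in range(0, N):
--         j = c
--         i = 0
--         r = [0] * N
--         while(i < N and j >= 0):
--              r[i] = lst[i][j]
--              i += 1
--              j -= 1
--         result.append(r)
--     for c in range(1, N):
--         j = N - 1
--         i = c
--         r = [0] * len(lst)
--         while(i < len(lst) and j >= 0):
--              r[j] = lst[i][j]
--              i += 1
--              j -= 1
--         result.append(r[::-1])
--     return result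
-- ===== SOURCE B (Python) =====
-- def anti_Diagonal(lst):
--     N = len(lst)
--     result = []
--     for s in range(0, 2 * N - 1):
--         r = [0] * N
--         idx = 0
--         for i in range(0, N):
--             j = s - i
--             if 0 <= j < N:
--                 r[idx] = lst[i][j]
--                 idx += 1
--         result.append(r)
--     return result
-- ===== Notes on version B (the rewrite author's own statement) =====
-- stated objective: simpler
-- what changed: B replaces A's two triangle passes (upper anti-diagonals filled forward, lower ones filled backward and then reversed with r[::-1]) by one uniform loop over the anti-diagonal index s in range(2*N-1), filling each zero-padded row left-justified with a counter; no reversal pass.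
import Mathlib
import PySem

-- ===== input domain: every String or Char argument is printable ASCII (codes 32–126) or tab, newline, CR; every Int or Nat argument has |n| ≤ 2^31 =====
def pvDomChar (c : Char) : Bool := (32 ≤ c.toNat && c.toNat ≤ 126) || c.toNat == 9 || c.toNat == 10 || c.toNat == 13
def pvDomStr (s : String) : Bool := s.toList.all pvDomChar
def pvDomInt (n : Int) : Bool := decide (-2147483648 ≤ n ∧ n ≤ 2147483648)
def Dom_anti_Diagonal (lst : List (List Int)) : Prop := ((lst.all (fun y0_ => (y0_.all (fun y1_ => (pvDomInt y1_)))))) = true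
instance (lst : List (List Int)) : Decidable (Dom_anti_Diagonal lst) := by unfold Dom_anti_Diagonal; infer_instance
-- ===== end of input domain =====

-- B replaces A's two triangle passes (forward fill, then backward fill + r[::-1] reversal) by one
-- uniform loop over the anti-diagonal index s with a fill counter; same cost, simpler (objective: simpler).

-- ===== PORT A =====
-- lst[i][j]: both loops only ever form indices i, j ≥ 0, and under Pre_ they are in range,
-- so this getD-based access is exact there.
def pvVal (lst : List (List Int)) (i j : Nat) : Int := (lst.getD i []).getD j 0

-- first while loop of A: r[i] = lst[i][j], i += 1, j -= 1 (fuel ≥ number of iterations; the loop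
-- itself stops via its own condition)
def pvWhileFwd (lst : List (List Int)) (N : Nat) (r : List Int) (i : Nat) (j : Int) : Nat → List Int
  | 0 => r
  | fuel + 1 =>
    if i < N ∧ 0 ≤ j then pvWhileFwd lst N (r.set i (pvVal lst i j.toNat)) (i + 1) (j - 1) fuel
    else r

-- second while loop of A: r[j] = lst[i][j], i += 1, j -= 1
def pvWhileBwd (lst : List (List Int)) (N : Nat) (r : List Int) (i : Nat) (j : Int) : Nat → List Int
  | 0 => r
  | fuel + 1 =>
    if i < N ∧ 0 ≤ j then pvWhileBwd lst N (r.set j.toNat (pvVal lst i j.toNat)) (i + 1) (j - 1) fuel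
    else r

def anti_Diagonal (lst : List (List Int)) : List (List Int) :=
  let N := lst.length
  let part1 := (List.range N).map (fun (c : Nat) =>
    pvWhileFwd lst N (List.replicate N (0 : Int)) 0 (c : Int) N)
  let part2 := (List.range' 1 (N - 1)).map (fun (c : Nat) =>
    (pvWhileBwd lst N (List.replicate N (0 : Int)) c ((N : Int) - 1) N).reverse)
  part1 ++ part2

-- ===== PORT B =====
-- inner for-loop of B: for i in range(N): j = s - i; if 0 <= j < N: r[idx] = lst[i][j]; idx += 1
def pvRowB (lst : List (List Int)) (N s : Nat) : List Int :=
  ((List.range N).foldl (fun (st : List Int × Nat) (i : Nat) =>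
      let j : Int := (s : Int) - (i : Int)
      if 0 ≤ j ∧ j < (N : Int) then (st.1.set st.2 (pvVal lst i j.toNat), st.2 + 1) else st)
    (List.replicate N (0 : Int), 0)).1

def anti_Diagonal_alt (lst : List (List Int)) : List (List Int) :=
  let N := lst.length
  (List.range (2 * N - 1)).map (fun s => pvRowB lst N s)

-- ===== PRECONDITION & SPEC =====
-- Pre_ excludes exactly the inputs where Python A raises IndexError: a row shorter than len(lst)
-- (A reads lst[i][j] for every 0 ≤ i, j < len(lst)).
def Pre_anti_Diagonal (lst : List (List Int)) : Prop := ∀ row ∈ lst, lst.length ≤ row.length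
instance (lst : List (List Int)) : Decidable (Pre_anti_Diagonal lst) := by unfold Pre_anti_Diagonal; infer_instance
def pvWitness_anti_Diagonal : List (List Int) := [[1, 2], [3, 4]]

def Spec_anti_Diagonal (lst : List (List Int)) (out : List (List Int)) : Prop := out = anti_Diagonal_alt lst
instance (lst : List (List Int)) (out : List (List Int)) : Decidable (Spec_anti_Diagonal lst out) := by unfold Spec_anti_Diagonal; infer_instance

-- ===== CLAIM (what is proved, stated in full; the proofs are below) =====
def Claim_equal_anti_Diagonal : Prop := ∀ (lst : List (List Int)), Dom_anti_Diagonal lst → Pre_anti_Diagonal lst → Spec_anti_Diagonal lst (anti_Diagonal lst)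

-- ===== LEMMAS AND PROOFS =====

-- a length-N list is the range-N map of its getD values
theorem pv_map_range_getD (r : List Int) (N : Nat) (h : r.length = N) :
    (List.range N).map (fun k => r.getD k 0) = r := by
  apply List.ext_getElem
  · simp [h]
  · intro k h1 h2
    simp only [List.getElem_map, List.getElem_range]
    rw [List.getD_eq_getElem?_getD, List.getElem?_eq_getElem (by omega)]
    rfl

theorem pv_getD_set_self (r : List Int) (i : Nat) (v : Int) (h : i < r.length) :
    (r.set i v).getD i 0 = v := by
  rw [List.getD_eq_getElem?_getD, List.getElem?_set_self (by omega)]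
  rfl

theorem pv_getD_set_ne (r : List Int) (i k : Nat) (v : Int) (h : i ≠ k) :
    (r.set i v).getD k 0 = r.getD k 0 := by
  rw [List.getD_eq_getElem?_getD, List.getElem?_set_ne h, ← List.getD_eq_getElem?_getD]

-- characterization of A's first while loop
theorem pv_fwd_elem (lst : List (List Int)) (N c : Nat) (hc : c < N) :
    ∀ (n : Nat) (i : Nat) (r : List Int) (fuel : Nat), i + n = c + 1 → r.length = N → n ≤ fuel →
    pvWhileFwd lst N r i ((c : Int) - (i : Int)) fuel =
      (List.range N).map (fun k => if i ≤ k ∧ k ≤ c then pvVal lst k (c - k) else r.getD k 0) := by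
  intro n
  induction n with
  | zero =>
    intro i r fuel hi hr _
    have : ¬ (0 ≤ (c : Int) - (i : Int)) := by omega
    have hstop : pvWhileFwd lst N r i ((c : Int) - (i : Int)) fuel = r := by
      cases fuel with
      | zero => rfl
      | succ f => simp only [pvWhileFwd]; rw [if_neg (by omega)]
    rw [hstop]
    conv_lhs => rw [← pv_map_range_getD r N hr]
    apply List.map_congr_left
    intro k _
    rw [if_neg (by omega)]
  | succ m ih =>
    intro i r fuel hi hr hfuel
    obtain ⟨f, rfl⟩ : ∃ f, fuel = f + 1 := ⟨fuel - 1, by omega⟩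
    simp only [pvWhileFwd]
    rw [if_pos (by constructor <;> omega)]
    have htn : ((c : Int) - (i : Int)).toNat = c - i := by omega
    have hstep : (c : Int) - (i : Int) - 1 = (c : Int) - ((i + 1 : Nat) : Int) := by push_cast; ring
    rw [htn, hstep, ih (i + 1) (r.set i (pvVal lst i (c - i))) f (by omega) (by simp [hr]) (by omega)]
    apply List.map_congr_left
    intro k hk
    rw [List.mem_range] at hk
    by_cases h1 : i + 1 ≤ k ∧ k ≤ c
    · rw [if_pos h1, if_pos (by omega)]
    · rw [if_neg h1]
      by_cases h2 : k = i
      · subst h2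
        rw [if_pos (by omega), pv_getD_set_self _ _ _ (by omega)]
      · rw [if_neg (by omega), pv_getD_set_ne _ _ _ _ (fun h => h2 h.symm)]

-- characterization of A's second while loop (i runs from c up, j = N-1-(i-c) down)
theorem pv_bwd_elem (lst : List (List Int)) (N c : Nat) (hc : c < N) :
    ∀ (n : Nat) (i : Nat) (r : List Int) (fuel : Nat), c ≤ i → i + n = N → r.length = N → n ≤ fuel →
    pvWhileBwd lst N r i ((N : Int) - 1 - ((i - c : Nat) : Int)) fuel =
      (List.range N).map (fun k => if c ≤ k ∧ k + (i - c) ≤ N - 1 then pvVal lst (c + (N - 1 - k)) k else r.getD k 0) := by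
  intro n
  induction n with
  | zero =>
    intro i r fuel hci hi hr _
    have hstop : pvWhileBwd lst N r i ((N : Int) - 1 - ((i - c : Nat) : Int)) fuel = r := by
      cases fuel with
      | zero => rfl
      | succ f => simp only [pvWhileBwd]; rw [if_neg (by omega)]
    rw [hstop]
    conv_lhs => rw [← pv_map_range_getD r N hr]
    apply List.map_congr_left
    intro k hk
    rw [List.mem_range] at hk
    rw [if_neg (by omega)]
  | succ m ih =>
    intro i r fuel hci hi hr hfuel
    obtain ⟨f, rfl⟩ : ∃ f, fuel = f + 1 := ⟨fuel - 1, by omega⟩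
    simp only [pvWhileBwd]
    rw [if_pos (by constructor <;> omega)]
    have htn : ((N : Int) - 1 - ((i - c : Nat) : Int)).toNat = N - 1 - (i - c) := by omega
    have hstep : (N : Int) - 1 - ((i - c : Nat) : Int) - 1 = (N : Int) - 1 - ((i + 1 - c : Nat) : Int) := by omega
    rw [htn, hstep,
      ih (i + 1) (r.set (N - 1 - (i - c)) (pvVal lst i (N - 1 - (i - c)))) f (by omega) (by omega) (by simp [hr]) (by omega)]
    apply List.map_congr_left
    intro k hk
    rw [List.mem_range] at hk
    by_cases h1 : c ≤ k ∧ k + (i + 1 - c) ≤ N - 1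
    · rw [if_pos h1, if_pos (by omega)]
    · rw [if_neg h1]
      by_cases h2 : k = N - 1 - (i - c)
      · subst h2
        rw [if_pos (by omega), pv_getD_set_self _ _ _ (by omega)]
        congr 1
        omega
      · rw [if_neg (by omega), pv_getD_set_ne _ _ _ _ (fun h => h2 h.symm)]

-- B's fold body
def pvBodyB (lst : List (List Int)) (N s : Nat) (st : List Int × Nat) (i : Nat) : List Int × Nat :=
  let j : Int := (s : Int) - (i : Int)
  if 0 ≤ j ∧ j < (N : Int) then (st.1.set st.2 (pvVal lst i j.toNat), st.2 + 1) else st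

theorem pvRowB_eq_fold (lst : List (List Int)) (N s : Nat) :
    pvRowB lst N s = ((List.range N).foldl (pvBodyB lst N s) (List.replicate N (0 : Int), 0)).1 := by
  unfold pvRowB pvBodyB
  rfl

-- segments where the condition is false do nothing
theorem pv_foldB_skip (lst : List (List Int)) (N s : Nat) :
    ∀ (l : List Nat) (st : List Int × Nat),
    (∀ i ∈ l, ¬ (0 ≤ (s : Int) - (i : Int) ∧ (s : Int) - (i : Int) < (N : Int))) →
    l.foldl (pvBodyB lst N s) st = st := by
  intro l
  induction l with
  | nil => intro st _; rfl
  | cons a t ih =>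
    intro st h
    simp only [List.foldl_cons]
    have : pvBodyB lst N s st a = st := by
      simp only [pvBodyB]
      rw [if_neg (h a (List.mem_cons_self))]
    rw [this, ih st (fun i hi => h i (List.mem_cons_of_mem a hi))]

-- a run where the condition is always true: positions idx..idx+n-1 get filled
theorem pv_foldB_run (lst : List (List Int)) (N s : Nat) :
    ∀ (n a : Nat) (r : List Int) (idx : Nat),
    (∀ t, t < n → a + t ≤ s ∧ (s : Int) - ((a + t : Nat) : Int) < (N : Int)) →
    r.length = N → idx + n ≤ N →
    (List.range' a n).foldl (pvBodyB lst N s) (r, idx) =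
      ((List.range N).map (fun k => if idx ≤ k ∧ k < idx + n then pvVal lst (a + (k - idx)) (s - (a + (k - idx))) else r.getD k 0), idx + n) := by
  intro n
  induction n with
  | zero =>
    intro a r idx _ hr _
    simp only [List.range'_zero, List.foldl_nil]
    rw [show (List.range N).map (fun k => if idx ≤ k ∧ k < idx + 0 then pvVal lst (a + (k - idx)) (s - (a + (k - idx))) else r.getD k 0)
        = (List.range N).map (fun k => r.getD k 0) from List.map_congr_left (fun k _ => by rw [if_neg (by omega)])]
    rw [pv_map_range_getD r N hr]
    rfl
  | succ m ih =>
    intro a r idx hcond hr hidx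
    rw [List.range'_succ, List.foldl_cons]
    have h0 := hcond 0 (by omega)
    have hbody : pvBodyB lst N s (r, idx) a = (r.set idx (pvVal lst a (s - a)), idx + 1) := by
      simp only [pvBodyB]
      rw [if_pos (by constructor <;> omega)]
      have : ((s : Int) - (a : Int)).toNat = s - a := by omega
      rw [this]
    rw [hbody, ih (a + 1) _ (idx + 1) (fun t ht => by have := hcond (t + 1) (by omega); constructor <;> omega)
        (by simp [hr]) (by omega)]
    rw [show idx + 1 + m = idx + (m + 1) from by omega]
    congr 1
    apply List.map_congr_left
    intro k hk
    rw [List.mem_range] at hk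
    by_cases h1 : idx + 1 ≤ k ∧ k < idx + (m + 1)
    · rw [if_pos h1, if_pos (by omega)]
      have e1 : a + 1 + (k - (idx + 1)) = a + (k - idx) := by omega
      rw [e1]
    · rw [if_neg h1]
      by_cases h2 : k = idx
      · subst h2
        rw [if_pos (by omega), pv_getD_set_self _ _ _ (by omega)]
        have e1 : a + (k - k) = a := by omega
        rw [e1]
      · rw [if_neg (by omega), pv_getD_set_ne _ _ _ _ (fun h => h2 h.symm)]

-- closed form of one row of B, for any anti-diagonal index s ≤ 2N-2
theorem pv_rowB_closed (lst : List (List Int)) (N s : Nat) (hN : 0 < N) (hs : s ≤ 2 * N - 2) :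
    pvRowB lst N s =
      (List.range N).map (fun k =>
        if k < min (s + 1) N - (s + 1 - N) then pvVal lst ((s + 1 - N) + k) (s - ((s + 1 - N) + k)) else 0) := by
  set lo := s + 1 - N with hlo
  set cnt := min (s + 1) N - lo with hcnt
  have key : ∀ (a b c : Nat), List.range (a + b + c) = List.range' 0 a ++ List.range' a b ++ List.range' (a + b) c := by
    intro a b c
    rw [List.range_eq_range', ← List.range'_append_1, ← List.range'_append_1]
    simp
  have hsum : lo + cnt + (N - (lo + cnt)) = N := by omega
  have hsplit : List.range N = List.range' 0 lo ++ List.range' lo cnt ++ List.range' (lo + cnt) (N - (lo + cnt)) := by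
    have := key lo cnt (N - (lo + cnt))
    rw [hsum] at this
    exact this
  rw [pvRowB_eq_fold]
  conv_lhs => rw [hsplit]
  rw [List.foldl_append, List.foldl_append]
  rw [pv_foldB_skip lst N s (List.range' 0 lo) _ (by
    intro i hi
    rw [List.mem_range'] at hi
    omega)]
  rw [pv_foldB_run lst N s cnt lo (List.replicate N 0) 0 (by
    intro t ht
    constructor <;> omega) (by simp) (by omega)]
  rw [pv_foldB_skip lst N s (List.range' (lo + cnt) (N - (lo + cnt))) _ (by
    intro i hi
    rw [List.mem_range'] at hi
    omega)]
  simp only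
  apply List.map_congr_left
  intro k hk
  rw [List.mem_range] at hk
  by_cases h1 : k < cnt
  · rw [if_pos (show 0 ≤ k ∧ k < 0 + cnt from by omega), if_pos h1]
    have e1 : k - 0 = k := by omega
    rw [e1]
  · rw [if_neg (show ¬ (0 ≤ k ∧ k < 0 + cnt) from by omega), if_neg h1, List.getD_replicate _ hk]

-- reversing a map over range N flips the index
theorem pv_rev_map_range (f : Nat → Int) (N : Nat) :
    ((List.range N).map f).reverse = (List.range N).map (fun k => f (N - 1 - k)) := by
  apply List.ext_getElem
  · simp
  · intro k h1 h2
    simp [List.getElem_reverse]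

-- row equality, upper triangle: A's first-loop row c equals B's row s = c
theorem pv_row_upper (lst : List (List Int)) (N c : Nat) (hc : c < N) :
    pvWhileFwd lst N (List.replicate N (0 : Int)) 0 (c : Int) N = pvRowB lst N c := by
  have h := pv_fwd_elem lst N c hc (c + 1) 0 (List.replicate N 0) N (by omega) (by simp) (by omega)
  simp only [Nat.cast_zero, Int.sub_zero] at h
  rw [h, pv_rowB_closed lst N c (by omega) (by omega)]
  apply List.map_congr_left
  intro k hk
  rw [List.mem_range] at hk
  simp only [show min (c + 1) N = c + 1 from by omega, show c + 1 - N = 0 from by omega]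
  by_cases h1 : k ≤ c
  · rw [if_pos (show 0 ≤ k ∧ k ≤ c from by omega), if_pos (show k < c + 1 - 0 from by omega)]
    have e1 : 0 + k = k := by omega
    rw [e1]
  · rw [if_neg (by omega), if_neg (by omega), List.getD_replicate _ hk]

-- row equality, lower triangle: A's second-loop row c (reversed) equals B's row s = N - 1 + c
theorem pv_row_lower (lst : List (List Int)) (N c : Nat) (hc1 : 1 ≤ c) (hc2 : c < N) :
    (pvWhileBwd lst N (List.replicate N (0 : Int)) c ((N : Int) - 1) N).reverse =
      pvRowB lst N (N - 1 + c) := by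
  have h := pv_bwd_elem lst N c hc2 (N - c) c (List.replicate N 0) N (by omega) (by omega) (by simp) (by omega)
  have e : (N : Int) - 1 - ((c - c : Nat) : Int) = (N : Int) - 1 := by
    rw [Nat.sub_self]
    simp
  rw [e] at h
  rw [h, pv_rev_map_range, pv_rowB_closed lst N (N - 1 + c) (by omega) (by omega)]
  simp only [show min (N - 1 + c + 1) N = N from by omega]
  apply List.map_congr_left
  intro k hk
  rw [List.mem_range] at hk
  by_cases h1 : k < N - (N - 1 + c + 1 - N)
  · rw [if_pos h1, if_pos (show c ≤ N - 1 - k ∧ N - 1 - k + (c - c) ≤ N - 1 from by omega)]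
    have e1 : c + (N - 1 - (N - 1 - k)) = N - 1 + c + 1 - N + k := by omega
    have e2 : N - 1 - k = N - 1 + c - (N - 1 + c + 1 - N + k) := by omega
    rw [e1, e2]
  · rw [if_neg h1, if_neg (show ¬ (c ≤ N - 1 - k ∧ N - 1 - k + (c - c) ≤ N - 1) from by omega),
      List.getD_replicate _ (by omega)]

-- ===== VERDICT (by name: the statement is the Claim_ definition above) =====
theorem anti_Diagonal_spec : Claim_equal_anti_Diagonal := by
  intro lst _ _
  unfold Spec_anti_Diagonal anti_Diagonal anti_Diagonal_alt
  simp only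
  set N := lst.length with hN
  rcases Nat.eq_zero_or_pos N with h0 | hpos
  · rw [h0]
    rfl
  · have h21 : 2 * N - 1 = N + (N - 1) := by omega
    rw [h21, List.range_add, List.map_append]
    congr 1
    · apply List.map_congr_left
      intro c hc
      rw [List.mem_range] at hc
      exact pv_row_upper lst N c hc
    · rw [List.range'_eq_map_range, List.map_map, List.map_map]
      apply List.map_congr_left
      intro k hk
      rw [List.mem_range] at hk
      have h := pv_row_lower lst N (1 + k) (by omega) (by omega)
      simp only [Function.comp_apply]
      rw [h]
      congr 1
      omega
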